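-- pv_equiv track=rewrite | github.com/arshnirmal/paper-correction | report.py | strip_headers
-- ===== SOURCE A (Python) =====
-- def strip_headers(list_of_lines):
--
--     strip_candidates = []
--     for idx, line in enumerate(list_of_lines):
--         if not line.startswith(('0', 'a', 'Q', 'q', 'O')):
--             strip_candidates.append(line)
--             continue
--         elif line.startswith(('0', 'a', 'Q', 'q', 'O')):
--             sub = line.rsplit()[0]
--             for char in sub:
--                 if char.isdigit() or char == 'l' or char == 'z' or char == 'd' or char == 'I' or char == 'i':
--                     break
--             break
--
--     for lines in strip_candidates:
--         list_of_lines.remove(lines)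
--
--     return list_of_lines
-- ===== SOURCE B (Python) =====
-- def strip_headers(list_of_lines):
--     cut = len(list_of_lines)
--     for idx, line in enumerate(list_of_lines):
--         if line.startswith(('0', 'a', 'Q', 'q', 'O')):
--             cut = idx
--             break
--     del list_of_lines[:cut]
--     return list_of_lines
-- ===== Notes on version B (the rewrite author's own statement) =====
-- stated objective: simpler
-- what changed: B finds the single cut index of the first header-like line in one pass and deletes the prefix with one slice-delete, instead of A's collect-then-remove two passes with repeated list.remove scans and a dead rsplit/char loop.
import Mathlib
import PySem

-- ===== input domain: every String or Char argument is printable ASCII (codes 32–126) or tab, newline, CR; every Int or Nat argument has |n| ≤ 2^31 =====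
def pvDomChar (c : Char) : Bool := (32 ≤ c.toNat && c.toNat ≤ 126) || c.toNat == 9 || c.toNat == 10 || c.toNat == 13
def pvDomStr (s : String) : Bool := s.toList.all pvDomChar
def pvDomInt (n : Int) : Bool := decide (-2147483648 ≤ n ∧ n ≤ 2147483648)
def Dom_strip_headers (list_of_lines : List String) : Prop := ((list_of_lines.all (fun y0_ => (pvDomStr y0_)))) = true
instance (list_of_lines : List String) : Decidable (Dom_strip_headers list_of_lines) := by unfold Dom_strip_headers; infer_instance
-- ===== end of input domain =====

-- B replaces A's collect-candidates-then-list.remove two-pass with one pass finding the cut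
-- index plus a single slice delete (simpler). Both A and B mutate the argument in place in
-- Python; the equivalence proved here is about the returned value.

-- ===== PORT A =====
-- line.startswith(('0', 'a', 'Q', 'q', 'O'))
def pvIsHeader (line : String) : Bool :=
  PySem.Str.startswith line "0" || PySem.Str.startswith line "a" ||
  PySem.Str.startswith line "Q" || PySem.Str.startswith line "q" ||
  PySem.Str.startswith line "O"

-- A's first loop: accumulate non-header lines, break at the first header-like line.
-- In the header branch the Python computes sub = line.rsplit()[0] and runs a char loop,
-- then breaks; those computations are discarded (no effect on any state), ported as a
-- discarded let.  (rsplit()[0] cannot raise: a header line starts with a non-space char.)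
def pvCandidates : List String → List String
  | [] => []
  | line :: rest =>
    if !(pvIsHeader line) then line :: pvCandidates rest
    else
      let _sub := (PySem.Str.split₀ line).headD ""  -- value discarded by the Python loop
      []

def strip_headers (list_of_lines : List String) : List String :=
  -- second loop: for lines in strip_candidates: list_of_lines.remove(lines)
  -- (remove? never returns none here: each candidate is still present; .getD only totalises)
  (pvCandidates list_of_lines).foldl
    (fun acc line => (PySem.List.remove? acc line).getD acc) list_of_lines

-- ===== PORT B =====
-- B's loop: index of the first header-like line, or len(list) if none.
def pvCut : List String → Nat → Nat
  | [], idx => idx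
  | line :: rest, idx => if pvIsHeader line then idx else pvCut rest (idx + 1)

def strip_headers_alt (list_of_lines : List String) : List String :=
  List.drop (pvCut list_of_lines 0) list_of_lines  -- del list_of_lines[:cut]; return it

-- ===== PRECONDITION & SPEC =====
def Spec_strip_headers (list_of_lines : List String) (out : List String) : Prop := out = strip_headers_alt list_of_lines
instance (list_of_lines : List String) (out : List String) : Decidable (Spec_strip_headers list_of_lines out) := by unfold Spec_strip_headers; infer_instance

-- ===== CLAIM (what is proved, stated in full; the proofs are below) =====
def Claim_equal_strip_headers : Prop := ∀ (list_of_lines : List String), Dom_strip_headers list_of_lines → Spec_strip_headers list_of_lines (strip_headers list_of_lines)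

-- ===== LEMMAS AND PROOFS =====

-- B's cut index is the length of A's candidate prefix (shifted by the running index).
theorem pvCut_eq_candidates_length (lst : List String) (i : Nat) :
    pvCut lst i = (pvCandidates lst).length + i := by
  induction lst generalizing i with
  | nil => simp [pvCut, pvCandidates]
  | cons line rest ih =>
    by_cases h : pvIsHeader line
    · simp [pvCut, pvCandidates, h]
    · simp [pvCut, pvCandidates, h, ih]
      omega

-- The candidate list is exactly the corresponding prefix of the input.
theorem candidates_append_drop (lst : List String) :
    pvCandidates lst ++ List.drop (pvCandidates lst).length lst = lst := by
  induction lst with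
  | nil => simp [pvCandidates]
  | cons line rest ih =>
    by_cases h : pvIsHeader line
    · simp [pvCandidates, h]
    · simp [pvCandidates, h, ih]

-- Removing, in order, each element of a prefix removes exactly that prefix.
theorem foldl_remove_prefix (pre rest : List String) :
    pre.foldl (fun acc line => (PySem.List.remove? acc line).getD acc) (pre ++ rest) = rest := by
  induction pre with
  | nil => rfl
  | cons x p ih =>
    simpa [List.foldl_cons, PySem.List.remove?_cons_self] using ih

-- ===== VERDICT (by name: the statement is the Claim_ definition above) =====
theorem strip_headers_spec : Claim_equal_strip_headers := by
  intro lst _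
  unfold Spec_strip_headers strip_headers strip_headers_alt
  rw [pvCut_eq_candidates_length]
  conv_lhs => rw [show List.foldl (fun acc line => (PySem.List.remove? acc line).getD acc) lst (pvCandidates lst) = List.foldl (fun acc line => (PySem.List.remove? acc line).getD acc) (pvCandidates lst ++ List.drop (pvCandidates lst).length lst) (pvCandidates lst) from by rw [candidates_append_drop]]
  rw [foldl_remove_prefix]
  simp
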